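-- pv_equiv track=rewrite | github.com/Rishith2005/DriftSeal_IOMP | Transportation/transportation_models.py | _build_graph_from_junctions
-- ===== SOURCE A (Python) =====
-- from typing import Any, Dict, List, Optional, Sequence, Tuple
--
-- def _build_graph_from_junctions(junctions: Sequence[int]) -> Dict[int, List[int]]:
--     js = sorted({int(x) for x in junctions})
--     if len(js) <= 1:
--         return {int(js[0]): []} if js else {}
--     graph: Dict[int, List[int]] = {j: [] for j in js}
--     for i, j in enumerate(js):
--         for k in js:
--             if k == j:
--                 continue
--             if abs(int(k) - int(j)) == 1:
--                 graph[j].append(k)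
--         if i + 2 < len(js):
--             graph[j].append(js[i + 2])
--         if i - 2 >= 0:
--             graph[j].append(js[i - 2])
--         graph[j] = sorted(set(graph[j]))
--     return graph
-- ===== SOURCE B (Python) =====
-- from typing import Dict, List, Sequence
--
-- def _build_graph_from_junctions(junctions: Sequence[int]) -> Dict[int, List[int]]:
--     present = {int(x) for x in junctions}
--     js = sorted(present)
--     n = len(js)
--     graph: Dict[int, List[int]] = {}
--     for i, j in enumerate(js):
--         nb: List[int] = []
--         if i >= 2:
--             nb.append(js[i - 2])
--         if j - 1 in present:
--             nb.append(j - 1)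
--         if j + 1 in present:
--             nb.append(j + 1)
--         if i + 2 < n:
--             nb.append(js[i + 2])
--         graph[j] = nb
--     return graph
-- ===== Notes on version B (the rewrite author's own statement) =====
-- stated objective: faster
-- what changed: Instead of scanning all pairs of sorted unique junctions to find value-distance-1 neighbours, B looks up j-1 and j+1 directly in the junction set and reads the index+-2 neighbours off the sorted list, building each (already sorted, duplicate-free) adjacency list in one pass without the per-key sorted(set(...)) pass.
import Mathlib
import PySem

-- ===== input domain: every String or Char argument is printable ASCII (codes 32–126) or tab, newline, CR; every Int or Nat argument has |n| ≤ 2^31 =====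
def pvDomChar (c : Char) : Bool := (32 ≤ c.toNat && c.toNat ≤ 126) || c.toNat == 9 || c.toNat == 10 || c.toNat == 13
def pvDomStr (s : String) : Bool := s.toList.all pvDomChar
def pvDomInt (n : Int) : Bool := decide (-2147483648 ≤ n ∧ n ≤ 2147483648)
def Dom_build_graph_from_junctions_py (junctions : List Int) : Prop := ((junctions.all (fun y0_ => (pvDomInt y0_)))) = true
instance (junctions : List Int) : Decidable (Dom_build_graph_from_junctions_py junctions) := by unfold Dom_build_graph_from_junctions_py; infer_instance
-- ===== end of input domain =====

-- B replaces A's quadratic all-pairs scan for value±1 neighbours by direct set-membership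
-- tests plus index lookups on the sorted unique junction list (objective: faster).


-- ===== PORT A =====
-- inner loop body: `if k == j: continue` / `if abs(int(k) - int(j)) == 1: graph[j].append(k)`
def innerA_pv (j : Int) (g : PySem.Dict Int (List Int)) (k : Int) : PySem.Dict Int (List Int) :=
  if k = j then g
  else if (k - j).natAbs = 1 then g.modify j [] (fun l => l ++ [k]) else g

-- one iteration of `for i, j in enumerate(js)`
def stepA_pv (js : List Int) (g : PySem.Dict Int (List Int)) (p : Int × Int) :
    PySem.Dict Int (List Int) :=
  let g1 := js.foldl (innerA_pv p.2) g
  let g2 := if p.1 + 2 < (js.length : Int) then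
      g1.modify p.2 [] (fun l => l ++ [PySem.List.pyGetD js (p.1 + 2) 0]) else g1
  let g3 := if 0 ≤ p.1 - 2 then
      g2.modify p.2 [] (fun l => l ++ [PySem.List.pyGetD js (p.1 - 2) 0]) else g2
  g3.insert p.2 (PySem.List.sorted (PySem.Set.ofList (g3.getD p.2 [])) id)

def build_graph_from_junctions_py (junctions : List Int) : List (Int × List Int) :=
  let js := PySem.List.sorted (PySem.Set.ofList junctions) id
  if js.length ≤ 1 then
    match js with
    | [] => []
    | j :: _ => [(j, [])]
  else
    ((PySem.List.enumerate js).foldl (stepA_pv js)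
        (js.foldl (fun d j => d.insert j ([] : List Int)) PySem.Dict.empty)).items

-- ===== PORT B =====
def build_graph_from_junctions_py_alt (junctions : List Int) : List (Int × List Int) :=
  let present : PySem.Set Int := PySem.Set.ofList junctions
  let js := PySem.List.sorted present id
  let n := js.length
  ((PySem.List.enumerate js).foldl (fun g p =>
      g.insert p.2
        ((if 2 ≤ p.1 then [PySem.List.pyGetD js (p.1 - 2) 0] else []) ++
         (if present.contains (p.2 - 1) then [p.2 - 1] else []) ++
         (if present.contains (p.2 + 1) then [p.2 + 1] else []) ++
         (if p.1 + 2 < (n : Int) then [PySem.List.pyGetD js (p.1 + 2) 0] else [])))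
    PySem.Dict.empty).items

-- ===== PRECONDITION & SPEC =====
def Spec_build_graph_from_junctions_py (junctions : List Int) (out : List (Int × List Int)) : Prop := out = build_graph_from_junctions_py_alt junctions
instance (junctions : List Int) (out : List (Int × List Int)) : Decidable (Spec_build_graph_from_junctions_py junctions out) := by unfold Spec_build_graph_from_junctions_py; infer_instance

-- ===== CLAIM (what is proved, stated in full; the proofs are below) =====
def Claim_equal_build_graph_from_junctions_py : Prop := ∀ (junctions : List Int), Dom_build_graph_from_junctions_py junctions → Spec_build_graph_from_junctions_py junctions (build_graph_from_junctions_py junctions)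

-- ===== LEMMAS AND PROOFS =====

-- the predicate of A's inner filter
def predA_pv (j k : Int) : Bool := decide (¬ k = j ∧ (k - j).natAbs = 1)

-- the raw neighbour list A has accumulated at key j just before `graph[j] = sorted(set(...))`
def nbRawA_pv (js : List Int) (i j : Int) : List Int :=
  (([] ++ js.filter (predA_pv j)) ++
    (if i + 2 < (js.length : Int) then [PySem.List.pyGetD js (i + 2) 0] else [])) ++
  (if 0 ≤ i - 2 then [PySem.List.pyGetD js (i - 2) 0] else [])

def nbAval_pv (js : List Int) (i j : Int) : List Int :=
  PySem.List.sorted (PySem.Set.ofList (nbRawA_pv js i j)) id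

def nbBval_pv (js : List Int) (present : PySem.Set Int) (i j : Int) : List Int :=
  (if 2 ≤ i then [PySem.List.pyGetD js (i - 2) 0] else []) ++
  (if present.contains (j - 1) then [j - 1] else []) ++
  (if present.contains (j + 1) then [j + 1] else []) ++
  (if i + 2 < (js.length : Int) then [PySem.List.pyGetD js (i + 2) 0] else [])

lemma innerGet_ne_pv (j : Int) (ks : List Int) : ∀ (g : PySem.Dict Int (List Int)) (k' : Int),
    k' ≠ j → (ks.foldl (innerA_pv j) g).get? k' = g.get? k' := by
  induction ks with
  | nil => intro g k' h; rfl
  | cons a t ih =>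
    intro g k' h
    simp only [List.foldl_cons]
    rw [ih _ _ h]
    unfold innerA_pv
    split_ifs with h1 h2
    · rfl
    · simp only [PySem.Dict.modify]
      exact PySem.Dict.get?_insert_of_ne _ _ h
    · rfl

lemma innerGet_self_pv (j : Int) (ks : List Int) : ∀ (g : PySem.Dict Int (List Int)) (v : List Int),
    g.get? j = some v →
    (ks.foldl (innerA_pv j) g).get? j = some (v ++ ks.filter (predA_pv j)) := by
  induction ks with
  | nil => intro g v h; simpa using h
  | cons a t ih =>
    intro g v h
    simp only [List.foldl_cons, List.filter_cons]
    by_cases h1 : a = j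
    · have hp : predA_pv j a = false := by simp [predA_pv, h1]
      rw [hp]
      simp only [innerA_pv, if_pos h1]
      exact ih g v h
    · by_cases h2 : (a - j).natAbs = 1
      · have hp : predA_pv j a = true := by simp [predA_pv, h1, h2]
        rw [hp]
        simp only [innerA_pv, if_neg h1, if_pos h2, PySem.Dict.modify]
        have : (g.insert j (g.getD j [] ++ [a])).get? j = some (v ++ [a]) := by
          rw [PySem.Dict.getD_eq_get?_getD, h]
          exact PySem.Dict.get?_insert_self _ _ _
        have := ih (g.insert j (g.getD j [] ++ [a])) (v ++ [a]) this
        simpa [List.append_assoc] using this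
      · have hp : predA_pv j a = false := by simp [predA_pv, h2]
        rw [hp]
        simp only [innerA_pv, if_neg h1, if_neg h2]
        exact ih g v h

lemma innerKeys_pv (j : Int) (ks : List Int) : ∀ (g : PySem.Dict Int (List Int)),
    g.contains j = true → (ks.foldl (innerA_pv j) g).keys = g.keys := by
  induction ks with
  | nil => intro g _; rfl
  | cons a t ih =>
    intro g hc
    simp only [List.foldl_cons]
    by_cases h1 : a = j
    · rw [show innerA_pv j g a = g from if_pos h1]
      exact ih g hc
    · by_cases h2 : (a - j).natAbs = 1
      · have he : innerA_pv j g a = g.insert j (g.getD j [] ++ [a]) := by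
          simp [innerA_pv, h1, h2, PySem.Dict.modify]
        rw [he, ih _ (by simp)]
        exact PySem.Dict.keys_insert_of_contains _ _ hc
      · rw [show innerA_pv j g a = g by simp [innerA_pv, h1, h2]]
        exact ih g hc

lemma stepGet_ne_pv (js : List Int) (p : Int × Int) (g : PySem.Dict Int (List Int)) (k' : Int)
    (h : k' ≠ p.2) : (stepA_pv js g p).get? k' = g.get? k' := by
  unfold stepA_pv
  simp only [PySem.Dict.modify]
  split_ifs <;>
    simp only [PySem.Dict.get?_insert_of_ne _ _ h, innerGet_ne_pv p.2 js _ _ h]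

lemma stepGet_self_pv (js : List Int) (p : Int × Int) (g : PySem.Dict Int (List Int))
    (h : g.get? p.2 = some []) : (stepA_pv js g p).get? p.2 = some (nbAval_pv js p.1 p.2) := by
  unfold stepA_pv
  simp only [PySem.Dict.modify]
  have h1 := innerGet_self_pv p.2 js g [] h
  set g1 := js.foldl (innerA_pv p.2) g with hg1
  rw [PySem.Dict.get?_insert_self]
  unfold nbAval_pv nbRawA_pv
  congr 2
  split_ifs with hc ha ha <;>
    simp only [PySem.Dict.getD_eq_get?_getD, PySem.Dict.get?_insert_self, h1,
      Option.getD_some, List.nil_append, List.append_nil]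

lemma stepKeys_pv (js : List Int) (p : Int × Int) (g : PySem.Dict Int (List Int))
    (h : g.contains p.2 = true) : (stepA_pv js g p).keys = g.keys := by
  unfold stepA_pv
  simp only [PySem.Dict.modify]
  have hk1 := innerKeys_pv p.2 js g h
  set g1 := js.foldl (innerA_pv p.2) g with hg1
  have hc1 : g1.contains p.2 = true := by
    rw [PySem.Dict.contains_iff_mem_keys, hk1, ← PySem.Dict.contains_iff_mem_keys]; exact h
  split_ifs with hc ha ha <;>
    simp [PySem.Dict.keys_insert_of_contains, hc1, hk1]

lemma outerGet_pv (js : List Int) (todo : List (Int × Int)) : ∀ (g : PySem.Dict Int (List Int)) (k' : Int),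
    (∀ p ∈ todo, p.2 ≠ k') → (todo.foldl (stepA_pv js) g).get? k' = g.get? k' := by
  induction todo with
  | nil => intro g k' _; rfl
  | cons q t ih =>
    intro g k' h
    simp only [List.foldl_cons]
    rw [ih _ _ (fun p hp => h p (List.mem_cons_of_mem _ hp))]
    exact stepGet_ne_pv js q g k' (fun hk => h q List.mem_cons_self hk.symm)
    

lemma outerMain_pv (js : List Int) (todo : List (Int × Int)) : ∀ (g : PySem.Dict Int (List Int)),
    (todo.map Prod.snd).Nodup → (∀ p ∈ todo, g.get? p.2 = some []) →
    ∀ p ∈ todo, (todo.foldl (stepA_pv js) g).get? p.2 = some (nbAval_pv js p.1 p.2) := by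
  induction todo with
  | nil => intro g _ _ p hp; exact absurd hp (List.not_mem_nil)
  | cons q t ih =>
    intro g hnd hv p hp
    simp only [List.map_cons, List.nodup_cons] at hnd
    simp only [List.foldl_cons]
    rcases List.mem_cons.mp hp with rfl | hpt
    · rw [outerGet_pv js t _ p.2 (fun r hr hrp => hnd.1 (hrp ▸ List.mem_map_of_mem hr))]
      exact stepGet_self_pv js p g (hv p List.mem_cons_self)
    · refine ih (stepA_pv js g q) hnd.2 (fun r hr => ?_) p hpt
      have hne : r.2 ≠ q.2 := fun hrq => hnd.1 (hrq ▸ List.mem_map_of_mem hr)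
      rw [stepGet_ne_pv js q g r.2 hne]
      exact hv r (List.mem_cons_of_mem _ hr)

lemma outerKeys_pv (js : List Int) (todo : List (Int × Int)) : ∀ (g : PySem.Dict Int (List Int)),
    (∀ p ∈ todo, p.2 ∈ g.keys) → (todo.foldl (stepA_pv js) g).keys = g.keys := by
  induction todo with
  | nil => intro g _; rfl
  | cons q t ih =>
    intro g h
    simp only [List.foldl_cons]
    have hk : (stepA_pv js g q).keys = g.keys :=
      stepKeys_pv js q g ((PySem.Dict.contains_iff_mem_keys _ _).mpr (h q List.mem_cons_self))
    rw [ih _ (fun p hp => hk ▸ h p (List.mem_cons_of_mem _ hp)), hk]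

-- strictly sorted list: the elements at distance 1 from j are exactly j-1 and j+1, in order
lemma filter_pm_pv (j : Int) : ∀ (js : List Int), js.Pairwise (· < ·) →
    js.filter (predA_pv j) =
      (if j - 1 ∈ js then [j - 1] else []) ++ (if j + 1 ∈ js then [j + 1] else []) := by
  intro js h
  induction js with
  | nil => simp
  | cons a t ih =>
    have ha : ∀ b ∈ t, a < b := (List.pairwise_cons.mp h).1
    have ht := ih (List.pairwise_cons.mp h).2
    simp only [List.filter_cons, List.mem_cons]
    by_cases h1 : a = j - 1
    · have hp : predA_pv j a = true := by simp [predA_pv]; omega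
      have hnt : j - 1 ∉ t := fun hm => absurd (ha _ hm) (by omega)
      have hne : ¬ (j + 1 = a) := by omega
      have hne2 : ¬ (j + 1 = j - 1) := by omega
      rw [hp, ht]
      simp [h1, hnt, hne2]
    · by_cases h2 : a = j + 1
      · have hp : predA_pv j a = true := by simp [predA_pv]; omega
        have hnt1 : j - 1 ∉ t := fun hm => absurd (ha _ hm) (by omega)
        have hnt2 : j + 1 ∉ t := fun hm => absurd (ha _ hm) (by omega)
        have hne : ¬ (j - 1 = a) := by omega
        have hne3 : ¬ (j - 1 = j + 1) := by omega
        rw [hp, ht]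
        simp [h2, hnt1, hnt2, hne3]
      · have hp : predA_pv j a = false := by simp [predA_pv]; omega
        have hne1 : ¬ (j - 1 = a) := by omega
        have hne2 : ¬ (j + 1 = a) := by omega
        rw [hp, ht]
        simp [hne1, hne2]

-- sorted ∘ set of four optional pairwise-increasing singletons, rotated
lemma key4_pv (c1 c2 c3 c4 : Prop) [Decidable c1] [Decidable c2] [Decidable c3] [Decidable c4]
    (a b c d : Int)
    (hab : c1 → c2 → a < b) (hac : c1 → c3 → a < c) (had : c1 → c4 → a < d)
    (hbc : c2 → c3 → b < c) (hbd : c2 → c4 → b < d) (hcd : c3 → c4 → c < d) :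
    PySem.List.sorted (PySem.Set.ofList
        ((((if c2 then [b] else []) ++ (if c3 then [c] else [])) ++ (if c4 then [d] else [])) ++
          (if c1 then [a] else []))) id =
      (if c1 then [a] else []) ++ (if c2 then [b] else []) ++ (if c3 then [c] else []) ++
        (if c4 then [d] else []) := by
  have hnd : ((((if c2 then [b] else []) ++ (if c3 then [c] else [])) ++ (if c4 then [d] else [])) ++
      (if c1 then [a] else [])).Nodup := by
    split_ifs <;> simp_all <;> omega
  rw [PySem.Set.ofList_eq_self_of_nodup _ hnd]
  refine PySem.List.sorted_eq_of_perm_of_pairwise_lt _ _ id ?_ ?_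
  · have h1 : (if c1 then [a] else []) ++ (if c2 then [b] else []) ++ (if c3 then [c] else []) ++
        (if c4 then [d] else []) =
        (if c1 then [a] else []) ++ ((((if c2 then [b] else []) ++ (if c3 then [c] else [])) ++
          (if c4 then [d] else []))) := by
      simp [List.append_assoc]
    rw [h1]
    exact List.perm_append_comm
  · simp only [List.pairwise_append, id]
    split_ifs <;> simp_all

lemma nbEq_pv (junctions : List Int) (i : Nat)
    (hi : i < (PySem.List.sorted (PySem.Set.ofList junctions) id).length) :
    nbAval_pv (PySem.List.sorted (PySem.Set.ofList junctions) id) (i : Int)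
        (PySem.List.sorted (PySem.Set.ofList junctions) id)[i] =
      nbBval_pv (PySem.List.sorted (PySem.Set.ofList junctions) id) (PySem.Set.ofList junctions)
        (i : Int) (PySem.List.sorted (PySem.Set.ofList junctions) id)[i] := by
  have hperm := PySem.List.sorted_perm (PySem.Set.ofList junctions) id false
  set js := PySem.List.sorted (PySem.Set.ofList junctions) id with hjs
  replace hi : i < js.length := by rw [hjs]; exact hi
  have hnd : js.Nodup := hperm.nodup_iff.mpr (PySem.Set.nodup_ofList junctions)
  have hle : js.Pairwise (· ≤ ·) := by
    simpa [← hjs] using PySem.List.sorted_pairwise (PySem.Set.ofList junctions) id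
  have hlt : js.Pairwise (· < ·) := (hle.and hnd).imp (fun h => lt_of_le_of_ne h.1 h.2)
  have hmono := List.pairwise_iff_getElem.mp hlt
  have hmem : ∀ x : Int, x ∈ PySem.Set.ofList junctions ↔ x ∈ js := fun x => hperm.mem_iff.symm
  have hgA : 2 ≤ (i : Int) → PySem.List.pyGetD js ((i : Int) - 2) 0 = js[i - 2]'(by omega) := by
    intro h1
    rw [PySem.List.pyGetD_of_nonneg _ _ (by omega)]
    have ht : ((i : Int) - 2).toNat = i - 2 := by omega
    rw [ht, List.getD_eq_getElem _ _ (by omega)]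
  have hgC : ∀ (_h4 : (i : Int) + 2 < (js.length : Int)),
      PySem.List.pyGetD js ((i : Int) + 2) 0 = js[i + 2]'(by omega) := by
    intro h4
    rw [PySem.List.pyGetD_of_nonneg _ _ (by omega)]
    have ht : ((i : Int) + 2).toNat = i + 2 := by omega
    rw [ht, List.getD_eq_getElem _ _ (by omega)]
  unfold nbAval_pv nbRawA_pv nbBval_pv
  rw [filter_pm_pv js[i] js hlt]
  simp only [PySem.Set.contains_eq_decide, decide_eq_true_eq, hmem, List.nil_append,
    show (0 ≤ (i : Int) - 2) ↔ (2 ≤ (i : Int)) from by omega]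
  exact key4_pv (2 ≤ (i : Int)) (js[i] - 1 ∈ js) (js[i] + 1 ∈ js)
    ((i : Int) + 2 < (js.length : Int))
    (PySem.List.pyGetD js ((i : Int) - 2) 0) (js[i] - 1) (js[i] + 1)
    (PySem.List.pyGetD js ((i : Int) + 2) 0)
    (fun h1 _ => by
      rw [hgA h1]
      have g1 := hmono (i - 2) (i - 1) (by omega) (by omega) (by omega)
      have g2 := hmono (i - 1) i (by omega) hi (by omega)
      omega)
    (fun h1 _ => by
      rw [hgA h1]
      have g1 := hmono (i - 2) (i - 1) (by omega) (by omega) (by omega)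
      have g2 := hmono (i - 1) i (by omega) hi (by omega)
      omega)
    (fun h1 h4 => by
      rw [hgA h1, hgC h4]
      exact hmono (i - 2) (i + 2) (by omega) (by omega) (by omega))
    (fun _ _ => by omega)
    (fun _ h4 => by
      rw [hgC h4]
      have g1 := hmono i (i + 1) hi (by omega) (by omega)
      have g2 := hmono (i + 1) (i + 2) (by omega) (by omega) (by omega)
      omega)
    (fun _ h4 => by
      rw [hgC h4]
      have g1 := hmono i (i + 1) hi (by omega) (by omega)
      have g2 := hmono (i + 1) (i + 2) (by omega) (by omega) (by omega)
      omega)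

lemma alt_items_pv (junctions : List Int) :
    build_graph_from_junctions_py_alt junctions =
      (PySem.List.enumerate (PySem.List.sorted (PySem.Set.ofList junctions) id)).map
        (fun p => (p.2, nbBval_pv (PySem.List.sorted (PySem.Set.ofList junctions) id)
          (PySem.Set.ofList junctions) p.1 p.2)) := by
  have hperm := PySem.List.sorted_perm (PySem.Set.ofList junctions) id false
  have hnd : (PySem.List.sorted (PySem.Set.ofList junctions) id).Nodup :=
    hperm.nodup_iff.mpr (PySem.Set.nodup_ofList junctions)
  have hsnd : ((PySem.List.enumerate (PySem.List.sorted (PySem.Set.ofList junctions) id)).map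
      Prod.snd).Nodup := by
    rw [PySem.List.map_snd_enumerate]; exact hnd
  exact PySem.Dict.items_foldl_insert_fresh
    (PySem.List.enumerate (PySem.List.sorted (PySem.Set.ofList junctions) id)) Prod.snd
    (fun p => nbBval_pv (PySem.List.sorted (PySem.Set.ofList junctions) id)
      (PySem.Set.ofList junctions) p.1 p.2)
    PySem.Dict.empty (fun a _ => PySem.Dict.contains_empty _) hsnd

-- ===== VERDICT (by name: the statement is the Claim_ definition above) =====
theorem build_graph_from_junctions_py_spec : Claim_equal_build_graph_from_junctions_py := by
  intro junctions _
  unfold Spec_build_graph_from_junctions_py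
  rw [alt_items_pv]
  unfold build_graph_from_junctions_py
  dsimp only
  have hperm := PySem.List.sorted_perm (PySem.Set.ofList junctions) id false
  set js := PySem.List.sorted (PySem.Set.ofList junctions) id with hjs
  have hnd : js.Nodup := hperm.nodup_iff.mpr (PySem.Set.nodup_ofList junctions)
  have hmem : ∀ x : Int, x ∈ PySem.Set.ofList junctions ↔ x ∈ js := fun x => hperm.mem_iff.symm
  split_ifs with hlen
  · -- 0 or 1 junction
    match hjs2 : js with
    | [] => simp
    | j :: t =>
      have ht : t = [] := List.eq_nil_of_length_eq_zero (by simpa using hlen)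
      subst ht
      have h1 : j - 1 ∉ junctions := by
        intro hx
        have := (hmem (j - 1)).mp ((PySem.Set.mem_ofList junctions _).mpr hx)
        simp at this
      have h2 : j + 1 ∉ junctions := by
        intro hx
        have := (hmem (j + 1)).mp ((PySem.Set.mem_ofList junctions _).mpr hx)
        simp at this
      rw [show PySem.List.enumerate [j] = [((0 : Int), j)] from rfl]
      simp [nbBval_pv, h1, h2]
  · -- main branch
    set d0 := js.foldl (fun d j => d.insert j ([] : List Int)) PySem.Dict.empty with hd0
    have hd0items : d0.items = js.map (fun k => (k, ([] : List Int))) := by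
      have h := PySem.Dict.items_foldl_insert_fresh js (fun a => a) (fun _ => ([] : List Int))
        PySem.Dict.empty (fun a _ => PySem.Dict.contains_empty _) (by simpa using hnd)
      simpa using h
    have hd0keys : d0.keys = js := by
      rw [PySem.Dict.keys.eq_1, hd0items, List.map_map]
      have hcomp : ((fun x : ℤ × List ℤ => x.1) ∘ fun k : ℤ => (k, ([] : List ℤ))) = id := rfl
      rw [hcomp, List.map_id]
    have hd0get : ∀ k ∈ js, d0.get? k = some [] := by
      intro k hk
      refine PySem.Dict.get?_of_mem_items d0 ?_ (by rw [hd0keys]; exact hnd)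
      rw [hd0items]
      exact List.mem_map_of_mem hk
    set G := (PySem.List.enumerate js).foldl (stepA_pv js) d0 with hG
    have hsnd : ((PySem.List.enumerate js).map Prod.snd).Nodup := by
      rw [PySem.List.map_snd_enumerate]; exact hnd
    have hGkeys : G.keys = js := by
      rw [hG, outerKeys_pv js _ d0 (fun p hp => ?_), hd0keys]
      rw [hd0keys]
      rcases (PySem.List.mem_enumerate_iff js 0 p).mp hp with ⟨k, hk, rfl⟩
      exact List.getElem_mem hk
    have hGget : ∀ (k : Nat) (hk : k < js.length),
        G.get? js[k] = some (nbAval_pv js ((0 : Int) + (k : Int)) js[k]) := by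
      intro k hk
      have hp : ((0 : Int) + (k : Int), js[k]) ∈ PySem.List.enumerate js 0 :=
        (PySem.List.mem_enumerate_iff js 0 _).mpr ⟨k, hk, rfl⟩
      have := outerMain_pv js (PySem.List.enumerate js) d0 hsnd
        (fun p hp' => by
          rcases (PySem.List.mem_enumerate_iff js 0 p).mp hp' with ⟨m, hm, rfl⟩
          exact hd0get _ (List.getElem_mem hm)) _ hp
      exact this
    rw [PySem.Dict.items_eq_map_keys G (by rw [hGkeys]; exact hnd) [], hGkeys]
    apply List.ext_getElem
    · simp [PySem.List.length_enumerate]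
    · intro k hk1 hk2
      have hk : k < js.length := by simpa using hk1
      simp only [List.getElem_map, PySem.List.getElem_enumerate]
      have hv : G.getD js[k] [] = nbAval_pv js ((0 : Int) + (k : Int)) js[k] := by
        rw [PySem.Dict.getD_eq_get?_getD, hGget k hk]
        rfl
      rw [hv]
      simp only [zero_add]
      exact congrArg _ (nbEq_pv junctions k (by rw [← hjs]; exact hk))
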